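-- pv_equiv track=rewrite | github.com/radosavlevici210/CodeCraftStudio1 | attached_assets/CodeCraft_Replit_OneFile 2_1751450539863.py | generate_scene_for_lyrics
-- ===== SOURCE A (Python) =====
-- def generate_scene_for_lyrics(lyrics, verse_type, voice_style, music_style):
--     """Generate specific scene description for lyrics line"""
--     lyrics_lower = lyrics.lower()
--
--     # Epic battle scenes
--     if any(word in lyrics_lower for word in ['battle', 'fight', 'war', 'sword', 'victory']):
--         return "Epic battle scene with warriors, golden light, and triumphant atmosphere"
--
--     # Sacred/divine scenes
--     elif any(word in lyrics_lower for word in ['divine', 'sacred', 'eternal', 'heaven', 'glory']):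
--         return "Sacred temple with golden light rays, ethereal atmosphere, divine presence"
--
--     # Emotional scenes
--     elif any(word in lyrics_lower for word in ['heart', 'love', 'soul', 'emotion']):
--         return "Emotional close-up with dramatic lighting, intimate atmosphere"
--
--     # Journey/movement scenes
--     elif any(word in lyrics_lower for word in ['rise', 'ascend', 'journey', 'path', 'forward']):
--         return "Cinematic journey scene with movement, epic landscape, rising action"
--
--     # Chorus scenes (more dramatic)
--     elif verse_type == 'chorus':
--         return "Grand cinematic vista with epic scale, dramatic lighting, triumphant mood"
--
--     # Default epic scene
--     else:
--         return "Epic cinematic scene with dramatic lighting and heroic atmosphere"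
-- ===== SOURCE B (Python) =====
-- # B: flat keyword->priority dict, aggregate the minimum matching priority, index a scene list.
-- _KEYWORD_PRIORITY = {
--     'battle': 0, 'fight': 0, 'war': 0, 'sword': 0, 'victory': 0,
--     'divine': 1, 'sacred': 1, 'eternal': 1, 'heaven': 1, 'glory': 1,
--     'heart': 2, 'love': 2, 'soul': 2, 'emotion': 2,
--     'rise': 3, 'ascend': 3, 'journey': 3, 'path': 3, 'forward': 3,
-- }
--
-- _SCENES = [
--     "Epic battle scene with warriors, golden light, and triumphant atmosphere",
--     "Sacred temple with golden light rays, ethereal atmosphere, divine presence",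
--     "Emotional close-up with dramatic lighting, intimate atmosphere",
--     "Cinematic journey scene with movement, epic landscape, rising action",
-- ]
--
-- def generate_scene_for_lyrics(lyrics, verse_type, voice_style, music_style):
--     """Pick the scene of the highest-priority (lowest index) keyword found in the lyrics."""
--     lyrics_lower = lyrics.lower()
--     best = min((p for w, p in _KEYWORD_PRIORITY.items() if w in lyrics_lower),
--                default=None)
--     if best is not None:
--         return _SCENES[best]
--     if verse_type == 'chorus':
--         return "Grand cinematic vista with epic scale, dramatic lighting, triumphant mood"
--     return "Epic cinematic scene with dramatic lighting and heroic atmosphere"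
-- ===== Notes on version B (the rewrite author's own statement) =====
-- stated objective: alternative
-- what changed: Replaced the ordered if/elif chain of per-category any-checks by a flat keyword->priority dictionary aggregated with min over all matching keywords, indexing into a scene list; the chorus/default tail stays as branches.
import Mathlib
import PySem

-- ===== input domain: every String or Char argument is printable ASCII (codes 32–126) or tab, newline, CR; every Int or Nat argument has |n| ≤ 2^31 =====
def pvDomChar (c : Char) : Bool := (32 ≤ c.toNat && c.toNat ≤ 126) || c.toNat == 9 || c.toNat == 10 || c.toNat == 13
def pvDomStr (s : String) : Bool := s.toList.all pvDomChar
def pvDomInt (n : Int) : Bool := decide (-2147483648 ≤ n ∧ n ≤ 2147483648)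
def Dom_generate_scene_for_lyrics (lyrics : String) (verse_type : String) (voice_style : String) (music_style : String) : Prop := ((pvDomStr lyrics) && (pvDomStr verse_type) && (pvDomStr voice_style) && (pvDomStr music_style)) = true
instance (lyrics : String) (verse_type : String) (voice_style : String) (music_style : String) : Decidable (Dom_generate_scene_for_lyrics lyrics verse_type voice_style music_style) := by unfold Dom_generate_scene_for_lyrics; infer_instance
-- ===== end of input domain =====

-- B replaces A's ordered if/elif chain by a flat keyword->priority map aggregated with min and a scene-list lookup (alternative decomposition; return value only).


-- ===== PORT A =====
def generate_scene_for_lyrics (lyrics : String) (verse_type : String) (voice_style : String) (music_style : String) : String :=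
  let lyrics_lower := PySem.Str.lower lyrics
  if ["battle", "fight", "war", "sword", "victory"].any (fun word => PySem.Str.isIn word lyrics_lower) then
    "Epic battle scene with warriors, golden light, and triumphant atmosphere"
  else if ["divine", "sacred", "eternal", "heaven", "glory"].any (fun word => PySem.Str.isIn word lyrics_lower) then
    "Sacred temple with golden light rays, ethereal atmosphere, divine presence"
  else if ["heart", "love", "soul", "emotion"].any (fun word => PySem.Str.isIn word lyrics_lower) then
    "Emotional close-up with dramatic lighting, intimate atmosphere"
  else if ["rise", "ascend", "journey", "path", "forward"].any (fun word => PySem.Str.isIn word lyrics_lower) then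
    "Cinematic journey scene with movement, epic landscape, rising action"
  else if verse_type == "chorus" then
    "Grand cinematic vista with epic scale, dramatic lighting, triumphant mood"
  else
    "Epic cinematic scene with dramatic lighting and heroic atmosphere"

-- ===== PORT B =====
-- _KEYWORD_PRIORITY: flat keyword -> priority association list (Python dict in insertion order)
def kwPriority : List (String × Nat) :=
  [("battle", 0), ("fight", 0), ("war", 0), ("sword", 0), ("victory", 0),
   ("divine", 1), ("sacred", 1), ("eternal", 1), ("heaven", 1), ("glory", 1),
   ("heart", 2), ("love", 2), ("soul", 2), ("emotion", 2),
   ("rise", 3), ("ascend", 3), ("journey", 3), ("path", 3), ("forward", 3)]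

def sceneList : List String :=
  ["Epic battle scene with warriors, golden light, and triumphant atmosphere",
   "Sacred temple with golden light rays, ethereal atmosphere, divine presence",
   "Emotional close-up with dramatic lighting, intimate atmosphere",
   "Cinematic journey scene with movement, epic landscape, rising action"]

-- min(gen, default=None): fold taking the running minimum over matching keywords
def pvMinStep (low : String) (acc : Option Nat) (p : String × Nat) : Option Nat :=
  if PySem.Str.isIn p.1 low then
    match acc with
    | none => some p.2
    | some m => some (min m p.2)
  else acc

def generate_scene_for_lyrics_alt (lyrics : String) (verse_type : String) (voice_style : String) (music_style : String) : String :=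
  let lyrics_lower := PySem.Str.lower lyrics
  match kwPriority.foldl (pvMinStep lyrics_lower) none with
  | some best => sceneList.getD best ""  -- _SCENES[best]; best is always 0..3 so the index is in range
  | none =>
    if verse_type == "chorus" then
      "Grand cinematic vista with epic scale, dramatic lighting, triumphant mood"
    else
      "Epic cinematic scene with dramatic lighting and heroic atmosphere"

-- ===== PRECONDITION & SPEC =====
def Spec_generate_scene_for_lyrics (lyrics : String) (verse_type : String) (voice_style : String) (music_style : String) (out : String) : Prop := out = generate_scene_for_lyrics_alt lyrics verse_type voice_style music_style
instance (lyrics : String) (verse_type : String) (voice_style : String) (music_style : String) (out : String) : Decidable (Spec_generate_scene_for_lyrics lyrics verse_type voice_style music_style out) := by unfold Spec_generate_scene_for_lyrics; infer_instance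

-- ===== CLAIM (what is proved, stated in full; the proofs are below) =====
def Claim_equal_generate_scene_for_lyrics : Prop := ∀ (lyrics : String) (verse_type : String) (voice_style : String) (music_style : String), Dom_generate_scene_for_lyrics lyrics verse_type voice_style music_style → Spec_generate_scene_for_lyrics lyrics verse_type voice_style music_style (generate_scene_for_lyrics lyrics verse_type voice_style music_style)

-- ===== LEMMAS AND PROOFS =====
-- Folding pvMinStep over a block of keywords that all carry the same priority i
-- yields: merge i into the accumulator iff any keyword of the block matches.
theorem fold_group (low : String) (i : Nat) (ws : List String) (acc : Option Nat) :
    ((ws.map (fun w => (w, i))).foldl (pvMinStep low) acc)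
      = if ws.any (fun w => PySem.Str.isIn w low) then
          some (match acc with | none => i | some m => min m i)
        else acc := by
  induction ws generalizing acc with
  | nil => simp
  | cons w rest ih =>
    simp only [List.map, List.foldl, List.any, ih, pvMinStep]
    by_cases h : PySem.Chars.isIn w.toList low.toList = true
    · simp only [PySem.Str.isIn, h, Bool.true_or]
      cases acc with
      | none =>
        cases hr : rest.any (fun w => PySem.Str.isIn w low) <;> simp
      | some m =>
        cases hr : rest.any (fun w => PySem.Str.isIn w low) <;>
          simp
    · simp only [Bool.not_eq_true] at h
      simp [PySem.Str.isIn, h]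

-- ===== VERDICT (by name: the statement is the Claim_ definition above) =====
theorem generate_scene_for_lyrics_spec : Claim_equal_generate_scene_for_lyrics := by
  intro lyrics verse_type voice_style music_style _
  unfold Spec_generate_scene_for_lyrics generate_scene_for_lyrics generate_scene_for_lyrics_alt
  have h : kwPriority
      = (["battle", "fight", "war", "sword", "victory"].map (fun w => (w, 0)))
        ++ (["divine", "sacred", "eternal", "heaven", "glory"].map (fun w => (w, 1)))
        ++ (["heart", "love", "soul", "emotion"].map (fun w => (w, 2)))
        ++ (["rise", "ascend", "journey", "path", "forward"].map (fun w => (w, 3))) := rfl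
  simp only [h, List.foldl_append, fold_group]
  cases hb : ["battle", "fight", "war", "sword", "victory"].any (fun w => PySem.Str.isIn w (PySem.Str.lower lyrics)) <;>
  cases hd : ["divine", "sacred", "eternal", "heaven", "glory"].any (fun w => PySem.Str.isIn w (PySem.Str.lower lyrics)) <;>
  cases he : ["heart", "love", "soul", "emotion"].any (fun w => PySem.Str.isIn w (PySem.Str.lower lyrics)) <;>
  cases hj : ["rise", "ascend", "journey", "path", "forward"].any (fun w => PySem.Str.isIn w (PySem.Str.lower lyrics)) <;>
    simp [sceneList]
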